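-- pv_equiv track=rewrite | github.com/triepod-ai/agentgen | agentgen/utils.py | validate_yaml_frontmatter
-- ===== SOURCE A (Python) =====
-- def validate_yaml_frontmatter(content: str) -> bool:
--     """Validate YAML frontmatter format."""
--     lines = content.split('\n')
--
--     if not lines or lines[0].strip() != "---":
--         return False
--
--     # Find end of frontmatter
--     end_idx = -1
--     for i, line in enumerate(lines[1:], 1):
--         if line.strip() == "---":
--             end_idx = i
--             break
--
--     if end_idx == -1:
--         return False
--
--     # Check required fields
--     frontmatter_lines = lines[1:end_idx]
--     has_name = any(line.strip().startswith('name:') for line in frontmatter_lines)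
--     has_description = any(line.strip().startswith('description:') for line in frontmatter_lines)
--
--     return has_name and has_description
-- ===== SOURCE B (Python) =====
-- def validate_yaml_frontmatter(content: str) -> bool:
--     """Validate YAML frontmatter format (single-pass state machine)."""
--     lines = content.split('\n')
--     if not lines or lines[0].strip() != "---":
--         return False
--     has_name = False
--     has_description = False
--     for line in lines[1:]:
--         s = line.strip()
--         if s == "---":
--             return has_name and has_description
--         if s.startswith('name:'):
--             has_name = True
--         elif s.startswith('description:'):
--             has_description = True
--     return False
-- ===== Notes on version B (the rewrite author's own statement) =====
-- stated objective: simpler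
-- what changed: Replaced the separate end-delimiter search plus two subsequent any()-scans over a slice with a single-pass state machine that maintains has_name/has_description flags and returns as soon as the closing delimiter line is seen.
import Mathlib
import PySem

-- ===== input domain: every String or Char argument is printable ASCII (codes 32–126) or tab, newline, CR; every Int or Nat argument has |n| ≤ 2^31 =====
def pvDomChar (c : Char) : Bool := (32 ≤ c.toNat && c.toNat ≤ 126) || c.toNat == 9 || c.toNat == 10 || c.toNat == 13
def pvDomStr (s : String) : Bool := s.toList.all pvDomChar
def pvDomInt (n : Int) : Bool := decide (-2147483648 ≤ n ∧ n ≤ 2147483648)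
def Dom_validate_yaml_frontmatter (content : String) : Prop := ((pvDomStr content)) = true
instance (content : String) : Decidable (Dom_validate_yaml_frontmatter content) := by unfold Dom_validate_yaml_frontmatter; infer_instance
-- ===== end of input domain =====

-- B replaces A's three scans (find the closing '---', then two any() passes over the
-- slice) by one state-machine pass keeping has_name/has_description flags; objective: simpler.

-- ===== PORT A =====
-- for i, line in enumerate(lines[1:], 1): if line.strip() == "---": end_idx = i; break
def pvFindEnd : List String → Int → Int
  | [], _ => -1
  | line :: rest, i =>
    if PySem.Str.strip line == "---" then i else pvFindEnd rest (i + 1)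

-- body of A after `lines = content.split('\n')`
def pvACheck (lines : List String) : Bool :=
  if lines.isEmpty then false
  else
    match PySem.List.pyGet? lines 0 with
    | none => false    -- unreachable: lines nonempty
    | some l0 =>
      if PySem.Str.strip l0 ≠ "---" then false
      else
        let end_idx := pvFindEnd (PySem.List.slice lines (some 1) none) 1
        if end_idx == -1 then false
        else
          let frontmatter_lines := PySem.List.slice lines (some 1) (some end_idx)
          let has_name := frontmatter_lines.any
            (fun line => PySem.Str.startswith (PySem.Str.strip line) "name:")
          let has_description := frontmatter_lines.any
            (fun line => PySem.Str.startswith (PySem.Str.strip line) "description:")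
          has_name && has_description

def validate_yaml_frontmatter (content : String) : Bool :=
  pvACheck ((PySem.Str.split? content "\n").getD [])   -- split? is some: sep ≠ ""

-- ===== PORT B =====
-- single pass over lines[1:] with the two flags; returns at the closing '---'
def pvBLoop : List String → Bool → Bool → Bool
  | [], _, _ => false
  | line :: rest, hn, hd =>
    let s := PySem.Str.strip line
    if s == "---" then hn && hd
    else if PySem.Str.startswith s "name:" then pvBLoop rest true hd
    else if PySem.Str.startswith s "description:" then pvBLoop rest hn true
    else pvBLoop rest hn hd

-- body of B after the split
def pvBCheck (lines : List String) : Bool :=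
  match lines with
  | [] => false
  | l0 :: rest =>
    if PySem.Str.strip l0 ≠ "---" then false
    else pvBLoop rest false false

def validate_yaml_frontmatter_alt (content : String) : Bool :=
  pvBCheck ((PySem.Str.split? content "\n").getD [])

-- ===== PRECONDITION & SPEC =====
def Spec_validate_yaml_frontmatter (content : String) (out : Bool) : Prop := out = validate_yaml_frontmatter_alt content
instance (content : String) (out : Bool) : Decidable (Spec_validate_yaml_frontmatter content out) := by unfold Spec_validate_yaml_frontmatter; infer_instance

-- ===== CLAIM (what is proved, stated in full; the proofs are below) =====
def Claim_equal_validate_yaml_frontmatter : Prop := ∀ (content : String), Dom_validate_yaml_frontmatter content → Spec_validate_yaml_frontmatter content (validate_yaml_frontmatter content)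

-- ===== LEMMAS AND PROOFS =====

def pvDelim (l : String) : Bool := PySem.Str.strip l == "---"
def pvName (l : String) : Bool := PySem.Str.startswith (PySem.Str.strip l) "name:"
def pvDesc (l : String) : Bool := PySem.Str.startswith (PySem.Str.strip l) "description:"

-- a stripped line cannot start with both "name:" and "description:"
lemma pvName_desc (l : String) : pvName l = true → pvDesc l = false := by
  simp only [pvName, pvDesc, PySem.Str.startswith_eq]
  intro h
  by_contra hcon
  simp only [Bool.not_eq_false] at hcon
  rw [PySem.Chars.startswith_iff] at h hcon
  obtain ⟨t1, h1⟩ := h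
  obtain ⟨t2, h2⟩ := hcon
  rw [← h1] at h2
  simp at h2

lemma pvName_fold :
    (fun line : String => PySem.Chars.startswith (PySem.Chars.strip line.toList)
      ['n', 'a', 'm', 'e', ':']) = pvName := by
  funext l; simp [pvName]

lemma pvDesc_fold :
    (fun line : String => PySem.Chars.startswith (PySem.Chars.strip line.toList)
      ['d', 'e', 's', 'c', 'r', 'i', 'p', 't', 'i', 'o', 'n', ':']) = pvDesc := by
  funext l; simp [pvDesc]

lemma pvBLoop_eq (rest : List String) : ∀ hn hd : Bool,
    pvBLoop rest hn hd =
      if rest.any pvDelim then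
        (((rest.takeWhile (fun l => !pvDelim l)).any pvName || hn) &&
         ((rest.takeWhile (fun l => !pvDelim l)).any pvDesc || hd))
      else false := by
  induction rest with
  | nil => intro hn hd; simp [pvBLoop]
  | cons line rest ih =>
    intro hn hd
    rw [show pvBLoop (line :: rest) hn hd =
        (if pvDelim line then hn && hd
         else if pvName line then pvBLoop rest true hd
         else if pvDesc line then pvBLoop rest hn true
         else pvBLoop rest hn hd) from rfl]
    rw [List.any_cons, List.takeWhile_cons]
    cases hdl : pvDelim line
    · cases hname : pvName line
      · cases hdesc : pvDesc line
        · cases hany : rest.any pvDelim <;>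
            simp [hdl, hname, hdesc, hany, ih, hdl]
        · cases hany : rest.any pvDelim <;>
            simp [hdl, hname, hdesc, hany, ih]
      · have hdesc := pvName_desc line hname
        cases hany : rest.any pvDelim <;>
          simp [hname, hdesc, hany, ih]
    · simp [hdl]

lemma pvFindEnd_eq (rest : List String) : ∀ i : Int,
    pvFindEnd rest i =
      if rest.any pvDelim then i + ((rest.takeWhile (fun l => !pvDelim l)).length : Int)
      else -1 := by
  induction rest with
  | nil => intro i; simp [pvFindEnd]
  | cons line rest ih =>
    intro i
    rw [show pvFindEnd (line :: rest) i =
        (if pvDelim line then i else pvFindEnd rest (i + 1)) from rfl]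
    rw [List.any_cons, List.takeWhile_cons]
    cases hdl : pvDelim line
    · rw [ih]
      cases hany : rest.any pvDelim <;> simp [hdl, hany] <;> omega
    · simp [hdl]

lemma pvTake_takeWhile (rest : List String) (p : String → Bool) :
    rest.take ((rest.takeWhile p).length) = rest.takeWhile p := by
  generalize h : rest.takeWhile p = f
  obtain ⟨t, ht⟩ := rest.takeWhile_prefix p
  rw [h] at ht
  rw [← ht]
  simp

lemma pvACheck_eq (lines : List String) : pvACheck lines = pvBCheck lines := by
  cases lines with
  | nil => rfl
  | cons l0 rest =>
    by_cases h0 : PySem.Str.strip l0 = "---"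
    · rw [show pvACheck (l0 :: rest) =
          (let end_idx := pvFindEnd (PySem.List.slice (l0 :: rest) (some 1) none) 1
           if end_idx == -1 then false
           else
             let fm := PySem.List.slice (l0 :: rest) (some 1) (some end_idx)
             (fm.any pvName && fm.any pvDesc)) by
            simp [pvACheck, PySem.List.pyGet?, PySem.List.pyIdx?, h0, pvName_fold, pvDesc_fold]]
      rw [show pvBCheck (l0 :: rest) = pvBLoop rest false false by simp [pvBCheck, h0]]
      have hsl : PySem.List.slice (l0 :: rest) (some 1) none = rest := by
        simpa using PySem.List.slice_from_natCast (l0 :: rest) 1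
      rw [hsl, pvFindEnd_eq, pvBLoop_eq]
      cases hany : rest.any pvDelim
      · simp [hany]
      · simp only [hany, if_true]
        have hk : ∃ k : ℕ, ((rest.takeWhile (fun l => !pvDelim l)).length) = k := ⟨_, rfl⟩
        obtain ⟨k, hk⟩ := hk
        rw [hk]
        have hne : ((1 : Int) + (k : Int) == -1) = false := by
          simp only [beq_eq_false_iff_ne]; omega
        rw [hne]
        have hsl2 : PySem.List.slice (l0 :: rest) (some 1) (some ((1 : Int) + (k : Int)))
            = rest.take k := by
          simpa using PySem.List.slice_natCast_add (l0 :: rest) 1 k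
        rw [hsl2, ← hk, pvTake_takeWhile]
        simp
    · simp [pvACheck, pvBCheck, PySem.List.pyGet?, PySem.List.pyIdx?, h0]

-- ===== VERDICT (by name: the statement is the Claim_ definition above) =====
theorem validate_yaml_frontmatter_spec : Claim_equal_validate_yaml_frontmatter := by
  intro content _
  unfold Spec_validate_yaml_frontmatter validate_yaml_frontmatter validate_yaml_frontmatter_alt
  rw [pvACheck_eq]
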